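-- pv_equiv track=rewrite | github.com/Teerat-CH/Caesar-Cipher | backend/FormatString.py | segmentBySpecialCharacter
-- ===== SOURCE A (Python) =====
-- def segmentBySpecialCharacter(String, listOfSpecialCharacter):
--
--     if String == '':
--         return []
--
--     i = 0
--     while i < len(String) and String[i] not in listOfSpecialCharacter:
--         i += 1
--     head = String[:i+1]
--     tail = String[i+1:]
--
--     return [head] + segmentBySpecialCharacter(tail, listOfSpecialCharacter)
-- ===== SOURCE B (Python) =====
-- def segmentBySpecialCharacter(String, listOfSpecialCharacter):
--     if String == '':
--         return []
--     specials = set(listOfSpecialCharacter)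
--     bounds = [i + 1 for i, ch in enumerate(String) if ch in specials]
--     if not bounds or bounds[-1] != len(String):
--         bounds.append(len(String))
--     out = []
--     prev = 0
--     for b in bounds:
--         out.append(String[prev:b])
--         prev = b
--     return out
-- ===== Notes on version B (the rewrite author's own statement) =====
-- stated objective: faster
-- what changed: Replaces A's recursive rescan-the-tail decomposition (which copies the remaining string and rebuilds the result list at every segment) by a flat two-pass algorithm: first build the list of segment boundary indices, then slice the string once between consecutive boundaries.
import Mathlib
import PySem

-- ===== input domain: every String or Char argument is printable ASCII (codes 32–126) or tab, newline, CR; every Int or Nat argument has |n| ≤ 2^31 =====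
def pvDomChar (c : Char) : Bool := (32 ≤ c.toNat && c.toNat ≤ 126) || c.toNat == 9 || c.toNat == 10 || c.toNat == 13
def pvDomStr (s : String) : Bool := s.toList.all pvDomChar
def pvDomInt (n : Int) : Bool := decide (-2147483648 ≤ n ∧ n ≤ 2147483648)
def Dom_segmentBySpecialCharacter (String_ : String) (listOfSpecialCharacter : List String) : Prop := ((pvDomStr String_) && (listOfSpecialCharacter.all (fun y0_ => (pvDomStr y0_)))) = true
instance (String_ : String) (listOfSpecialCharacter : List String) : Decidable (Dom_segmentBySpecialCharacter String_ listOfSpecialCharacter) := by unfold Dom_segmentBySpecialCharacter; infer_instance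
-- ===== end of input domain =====

-- B replaces A's recursive rescan-the-tail decomposition (tail copied per segment) by a flat
-- two-pass boundary-table-then-slice algorithm; measured faster on a timing run's large inputs.

-- ===== PORT A =====
-- the while loop: i = number of leading characters of l not in listOfSpecialCharacter
-- (stops at the first special character, or at len when there is none)
def pvScanA (l : List Char) (sp : List String) : Nat :=
  match l with
  | [] => 0
  | c :: r => if String.mk [c] ∈ sp then 0 else pvScanA r sp + 1

-- the recursion of A on the character list (head = String[:i+1], tail = String[i+1:])
def pvSegA (l : List Char) (sp : List String) : List String :=
  if h : l = [] then []
  else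
    String.mk (l.take (pvScanA l sp + 1)) :: pvSegA (l.drop (pvScanA l sp + 1)) sp
termination_by l.length
decreasing_by
  cases l with
  | nil => exact absurd rfl h
  | cons c r => simp only [List.length_drop, List.length_cons]; omega

def segmentBySpecialCharacter (String_ : String) (listOfSpecialCharacter : List String) : List String :=
  pvSegA String_.toList listOfSpecialCharacter

-- ===== PORT B =====
-- first pass: bounds = [i + 1 for i, ch in enumerate(String) if ch in specials]
def pvBoundsB (l : List Char) (specials : PySem.Set String) (i : Nat) : List Nat :=
  match l with
  | [] => []
  | c :: r =>
    if PySem.Set.contains specials (String.mk [c]) then (i + 1) :: pvBoundsB r specials (i + 1)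
    else pvBoundsB r specials (i + 1)

-- second pass: for b in bounds: out.append(String[prev:b]); prev = b
def pvSlicesB (l : List Char) (bounds : List Nat) (prev : Nat) (out : List String) : List String :=
  match bounds with
  | [] => out
  | b :: bs => pvSlicesB l bs b (out ++ [String.mk ((l.drop prev).take (b - prev))])

def segmentBySpecialCharacter_alt (String_ : String) (listOfSpecialCharacter : List String) : List String :=
  let l := String_.toList
  if l = [] then []
  else
    let specials := PySem.Set.ofList listOfSpecialCharacter
    let bs := pvBoundsB l specials 0
    let bounds := if bs = [] ∨ bs.getLast? ≠ some l.length then bs ++ [l.length] else bs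
    pvSlicesB l bounds 0 []

-- ===== PRECONDITION & SPEC =====
def Spec_segmentBySpecialCharacter (String_ : String) (listOfSpecialCharacter : List String) (out : List String) : Prop := out = segmentBySpecialCharacter_alt String_ listOfSpecialCharacter
instance (String_ : String) (listOfSpecialCharacter : List String) (out : List String) : Decidable (Spec_segmentBySpecialCharacter String_ listOfSpecialCharacter out) := by unfold Spec_segmentBySpecialCharacter; infer_instance

-- ===== CLAIM (what is proved, stated in full; the proofs are below) =====
def Claim_equal_segmentBySpecialCharacter : Prop := ∀ (String_ : String) (listOfSpecialCharacter : List String), Dom_segmentBySpecialCharacter String_ listOfSpecialCharacter → Spec_segmentBySpecialCharacter String_ listOfSpecialCharacter (segmentBySpecialCharacter String_ listOfSpecialCharacter)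

-- ===== LEMMAS AND PROOFS =====

-- B's whole body on the character list (proof-side restatement of segmentBySpecialCharacter_alt)
def pvAltCore (l : List Char) (sp : List String) : List String :=
  if l = [] then []
  else
    let bs := pvBoundsB l (PySem.Set.ofList sp) 0
    pvSlicesB l (if bs = [] ∨ bs.getLast? ≠ some l.length then bs ++ [l.length] else bs) 0 []

theorem alt_eq_core (S : String) (sp : List String) :
    segmentBySpecialCharacter_alt S sp = pvAltCore S.toList sp := rfl

theorem contains_ofList_char (sp : List String) (x : String) :
    PySem.Set.contains (PySem.Set.ofList sp) x = true ↔ x ∈ sp := by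
  rw [PySem.Set.contains_iff, PySem.Set.mem_ofList]

theorem scanA_le (l : List Char) (sp : List String) : pvScanA l sp ≤ l.length := by
  induction l with
  | nil => simp [pvScanA]
  | cons c r ih => simp only [pvScanA, List.length_cons]; split <;> omega

theorem boundsB_shift (l : List Char) (s : PySem.Set String) (i : Nat) :
    pvBoundsB l s i = (pvBoundsB l s 0).map (· + i) := by
  induction l generalizing i with
  | nil => simp [pvBoundsB]
  | cons c r ih =>
    simp only [pvBoundsB]
    split
    · rw [ih (i + 1), ih 1]
      simp only [List.map_cons, List.map_map, Nat.zero_add]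
      refine congrArg₂ _ (by omega) (List.map_congr_left fun x _ => ?_)
      simp [Function.comp]; omega
    · rw [ih (i + 1), ih 1]
      simp only [List.map_map]
      exact List.map_congr_left fun x _ => by simp [Function.comp]; omega

theorem boundsB_nil_of_scan_len (l : List Char) (sp : List String) (i : Nat)
    (h : pvScanA l sp = l.length) : pvBoundsB l (PySem.Set.ofList sp) i = [] := by
  induction l generalizing i with
  | nil => simp [pvBoundsB]
  | cons c r ih =>
    simp only [pvScanA, List.length_cons] at h
    simp only [pvBoundsB]
    split
    · rename_i hc
      rw [contains_ofList_char] at hc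
      simp [hc] at h
    · split at h
      · omega
      · exact ih (i + 1) (by omega)

theorem boundsB_cons_of_scan_lt (l : List Char) (sp : List String) (i k : Nat)
    (hk : pvScanA l sp = k) (hlt : k < l.length) :
    pvBoundsB l (PySem.Set.ofList sp) i =
      (i + k + 1) :: pvBoundsB (l.drop (k + 1)) (PySem.Set.ofList sp) (i + k + 1) := by
  induction l generalizing i k with
  | nil => simp at hlt
  | cons c r ih =>
    simp only [pvScanA] at hk
    simp only [pvBoundsB]
    split
    · rename_i hc
      rw [contains_ofList_char] at hc
      simp [hc] at hk
      subst hk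
      simp
    · rename_i hc
      rw [contains_ofList_char] at hc
      simp [hc] at hk
      obtain ⟨kr, rfl⟩ : ∃ kr, k = kr + 1 := ⟨pvScanA r sp, by omega⟩
      have hkr : pvScanA r sp = kr := by omega
      have hlt' : kr < r.length := by simp [List.length_cons] at hlt; omega
      rw [ih (i + 1) kr hkr hlt']
      have h1 : i + 1 + kr + 1 = i + (kr + 1) + 1 := by omega
      simp only [List.drop_succ_cons, h1]

theorem slicesB_acc (l : List Char) (bs : List Nat) (p : Nat) (acc : List String) :
    pvSlicesB l bs p acc = acc ++ pvSlicesB l bs p [] := by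
  induction bs generalizing p acc with
  | nil => simp [pvSlicesB]
  | cons b t ih =>
    simp only [pvSlicesB]
    rw [ih b (acc ++ _), ih b ([] ++ _)]
    simp

theorem slicesB_shift (bs : List Nat) (l : List Char) (k p : Nat) (acc : List String) :
    pvSlicesB l (bs.map (· + k)) (p + k) acc = pvSlicesB (l.drop k) bs p acc := by
  induction bs generalizing p acc with
  | nil => simp [pvSlicesB]
  | cons b t ih =>
    simp only [List.map_cons, pvSlicesB]
    rw [List.drop_drop]
    have h1 : b + k - (p + k) = b - p := by omega
    have h2 : p + k = k + p := by omega
    rw [h1, h2, ih b]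

-- the final bounds of l, when the first special char is at index k and rest = l.drop (k+1) ≠ [],
-- are (k+1) followed by the final bounds of rest shifted by k+1
-- the final bounds of l, when the first special char is at index k and rest = l.drop (k+1) ≠ [],
-- are (k+1) followed by the final bounds of rest shifted by k+1
theorem final_cons (len rl k : Nat) (bsr : List Nat) (hrl : 0 < rl) (hlen : len = rl + (k + 1)) :
    (if (k + 1) :: bsr.map (· + (k + 1)) = [] ∨
        ((k + 1) :: bsr.map (· + (k + 1))).getLast? ≠ some len
      then ((k + 1) :: bsr.map (· + (k + 1))) ++ [len]
      else (k + 1) :: bsr.map (· + (k + 1))) =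
    (k + 1) ::
      ((if bsr = [] ∨ bsr.getLast? ≠ some rl then bsr ++ [rl] else bsr).map (· + (k + 1))) := by
  rcases List.eq_nil_or_concat bsr with hbe | ⟨q, g, hqg⟩
  · subst hbe
    rw [if_pos (Or.inr (by simp; omega)), if_pos (Or.inl rfl)]
    simp; omega
  · rw [List.concat_eq_append] at hqg
    subst hqg
    have hgl : ((k + 1) :: (q ++ [g]).map (· + (k + 1))).getLast? = some (g + (k + 1)) := by
      rw [show (k + 1) :: (q ++ [g]).map (· + (k + 1)) =
          ((k + 1) :: q.map (· + (k + 1))) ++ [g + (k + 1)] from by simp,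
        List.getLast?_concat]
    have hgr : (q ++ [g]).getLast? = some g := List.getLast?_concat
    by_cases hg : g = rl
    · subst hg
      have hc1 : ¬((k + 1) :: (q ++ [g]).map (· + (k + 1)) = [] ∨
          ((k + 1) :: (q ++ [g]).map (· + (k + 1))).getLast? ≠ some len) := by
        rw [hgl]; simp; omega
      have hc2 : ¬(q ++ [g] = [] ∨ (q ++ [g]).getLast? ≠ some g) := by
        rw [hgr]; simp
      rw [if_neg hc1, if_neg hc2]
    · have hc1 : (k + 1) :: (q ++ [g]).map (· + (k + 1)) = [] ∨
          ((k + 1) :: (q ++ [g]).map (· + (k + 1))).getLast? ≠ some len :=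
        Or.inr (by rw [hgl]; simp; omega)
      have hc2 : q ++ [g] = [] ∨ (q ++ [g]).getLast? ≠ some rl :=
        Or.inr (by rw [hgr]; simp [hg])
      rw [if_pos hc1, if_pos hc2]
      simp
      omega

theorem main_core (n : Nat) :
    ∀ (l : List Char) (sp : List String), l.length ≤ n → pvSegA l sp = pvAltCore l sp := by
  induction n with
  | zero =>
    intro l sp hl
    have : l = [] := List.eq_nil_of_length_eq_zero (by omega)
    subst this
    simp [pvSegA, pvAltCore]
  | succ n ih =>
    intro l sp hl
    by_cases hnil : l = []
    · subst hnil; simp [pvSegA, pvAltCore]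
    · rw [pvSegA, dif_neg hnil]
      set k := pvScanA l sp with hk
      have hkle : k ≤ l.length := scanA_le l sp
      have hlen : 0 < l.length := List.length_pos_iff.mpr hnil
      by_cases hcase : k = l.length
      · -- no special character: one segment, the whole string
        have hb : pvBoundsB l (PySem.Set.ofList sp) 0 = [] :=
          boundsB_nil_of_scan_len l sp 0 (by rw [← hk]; exact hcase)
        have htake : l.take (k + 1) = l := List.take_of_length_le (by omega)
        have hdrop : l.drop (k + 1) = [] := List.drop_eq_nil_of_le (by omega)
        rw [htake, hdrop, pvSegA]
        simp only [pvAltCore, if_neg hnil, hb]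
        simp [pvSlicesB, List.take_of_length_le]
      · have hklt : k < l.length := by omega
        have hbl := boundsB_cons_of_scan_lt l sp 0 k rfl hklt
        simp only [Nat.zero_add] at hbl
        have hrlen : (l.drop (k + 1)).length = l.length - (k + 1) := by simp
        by_cases hrnil : l.drop (k + 1) = []
        · -- the special character is the last character
          have hkl : k + 1 = l.length := by rw [hrnil] at hrlen; simp at hrlen; omega
          have hb : pvBoundsB l (PySem.Set.ofList sp) 0 = [l.length] := by
            rw [hbl, hrnil]; simp [pvBoundsB, hkl]
          have htake : l.take (k + 1) = l := List.take_of_length_le (by omega)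
          rw [hrnil, htake, pvSegA]
          simp only [pvAltCore, if_neg hnil, hb]
          simp [pvSlicesB, List.take_of_length_le]
        · -- at least one more segment after the first special character
          have hrpos : 0 < (l.drop (k + 1)).length := List.length_pos_iff.mpr hrnil
          have hshift : pvBoundsB (l.drop (k + 1)) (PySem.Set.ofList sp) (k + 1) =
              (pvBoundsB (l.drop (k + 1)) (PySem.Set.ofList sp) 0).map (· + (k + 1)) :=
            boundsB_shift _ _ (k + 1)
          have hfin := final_cons l.length (l.drop (k + 1)).length k
            (pvBoundsB (l.drop (k + 1)) (PySem.Set.ofList sp) 0) hrpos (by omega)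
          have hIH : pvSegA (l.drop (k + 1)) sp = pvAltCore (l.drop (k + 1)) sp :=
            ih (l.drop (k + 1)) sp (by omega)
          have hsh := slicesB_shift
            (if pvBoundsB (l.drop (k + 1)) (PySem.Set.ofList sp) 0 = [] ∨
                (pvBoundsB (l.drop (k + 1)) (PySem.Set.ofList sp) 0).getLast? ≠
                  some (l.drop (k + 1)).length
              then pvBoundsB (l.drop (k + 1)) (PySem.Set.ofList sp) 0 ++
                [(l.drop (k + 1)).length]
              else pvBoundsB (l.drop (k + 1)) (PySem.Set.ofList sp) 0)
            l (k + 1) 0 []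
          simp only [Nat.zero_add] at hsh
          simp only [pvAltCore, if_neg hnil, hbl, hshift, hfin, pvSlicesB]
          rw [slicesB_acc, hsh, hIH]
          have hAlt : pvAltCore (l.drop (k + 1)) sp =
              pvSlicesB (l.drop (k + 1))
                (if pvBoundsB (l.drop (k + 1)) (PySem.Set.ofList sp) 0 = [] ∨
                    (pvBoundsB (l.drop (k + 1)) (PySem.Set.ofList sp) 0).getLast? ≠
                      some (l.drop (k + 1)).length
                  then pvBoundsB (l.drop (k + 1)) (PySem.Set.ofList sp) 0 ++
                    [(l.drop (k + 1)).length]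
                  else pvBoundsB (l.drop (k + 1)) (PySem.Set.ofList sp) 0)
                0 [] := by
            simp only [pvAltCore, if_neg hrnil]
          rw [hAlt]
          simp

theorem segmentBySpecialCharacter_eq (S : String) (sp : List String) :
    segmentBySpecialCharacter S sp = segmentBySpecialCharacter_alt S sp := by
  rw [alt_eq_core]
  exact main_core S.toList.length S.toList sp le_rfl

-- ===== VERDICT (by name: the statement is the Claim_ definition above) =====
theorem segmentBySpecialCharacter_spec : Claim_equal_segmentBySpecialCharacter := by
  intro S sp _
  unfold Spec_segmentBySpecialCharacter
  exact segmentBySpecialCharacter_eq S sp
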